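-- pv_equiv track=rewrite | github.com/carljohanr/PolyAI | cats-old/draw_board.py | pCounter
-- ===== SOURCE A (Python) =====
-- def pCounter(counts):
--     sq = 0
--     for i in range(len(counts)):
--         if i <12:
--             sq += 5*counts[i]
--         elif i<16:
--             sq += 4*counts[i]
--         elif i<18:
--             sq += 3*counts[i]
--         elif i==18:
--             sq += 2*counts[i]
--         else:
--             sq += counts[i]
--     return sq
-- ===== SOURCE B (Python) =====
-- def pCounter(counts):
--     # Each weight band is a stack of unit layers: weight(i) = 1 + [i<19] + [i<18] + [i<16] + [i<12].
--     # So the weighted sum is the grand total plus four unscaled prefix sums.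
--     return (sum(counts) + sum(counts[:19]) + sum(counts[:18])
--             + sum(counts[:16]) + sum(counts[:12]))
-- ===== Notes on version B (the rewrite author's own statement) =====
-- stated objective: alternative
-- what changed: Decomposes each index weight into unit indicator layers, computing the answer as the grand total plus four unscaled prefix sums (counts[:19], [:18], [:16], [:12]) with no weight constants and no per-index branching; the C-level sum calls make it measurably faster.
import Mathlib
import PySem

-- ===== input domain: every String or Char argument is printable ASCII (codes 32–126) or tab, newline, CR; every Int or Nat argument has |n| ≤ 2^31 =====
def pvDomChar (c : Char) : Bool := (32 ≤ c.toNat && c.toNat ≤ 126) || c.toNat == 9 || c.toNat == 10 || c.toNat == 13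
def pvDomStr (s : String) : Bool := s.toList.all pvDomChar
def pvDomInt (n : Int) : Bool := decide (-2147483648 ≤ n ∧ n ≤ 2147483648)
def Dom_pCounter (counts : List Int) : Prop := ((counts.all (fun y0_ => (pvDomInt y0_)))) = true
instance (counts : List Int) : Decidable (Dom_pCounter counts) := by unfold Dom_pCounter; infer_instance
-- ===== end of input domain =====

-- B decomposes each weight into unit indicator layers: the result is the grand total plus four plain prefix sums (no weights, no branching).

-- ===== PORT A =====
def pCounter (counts : List Int) : Int :=
  (PySem.List.pyRange 0 counts.length 1).foldl
    (fun sq i =>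
      if i < 12 then sq + 5 * PySem.List.pyGetD counts i 0
      else if i < 16 then sq + 4 * PySem.List.pyGetD counts i 0
      else if i < 18 then sq + 3 * PySem.List.pyGetD counts i 0
      else if i == 18 then sq + 2 * PySem.List.pyGetD counts i 0
      else sq + PySem.List.pyGetD counts i 0) 0

-- ===== PORT B =====
def pCounter_alt (counts : List Int) : Int :=
  counts.sum
    + (PySem.List.slice counts none (some 19)).sum
    + (PySem.List.slice counts none (some 18)).sum
    + (PySem.List.slice counts none (some 16)).sum
    + (PySem.List.slice counts none (some 12)).sum

-- ===== PRECONDITION & SPEC =====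
def Spec_pCounter (counts : List Int) (out : Int) : Prop := out = pCounter_alt counts
instance (counts : List Int) (out : Int) : Decidable (Spec_pCounter counts out) := by unfold Spec_pCounter; infer_instance

-- ===== CLAIM (what is proved, stated in full; the proofs are below) =====
def Claim_equal_pCounter : Prop := ∀ (counts : List Int), Dom_pCounter counts → Spec_pCounter counts (pCounter counts)

-- ===== LEMMAS AND PROOFS =====

/-- sum of the elements of `xs` whose absolute index (local index + offset `i`) lies in `[a, b)` -/
def bandSum (xs : List Int) (i a b : Nat) : Int := ((xs.take (b - i)).drop (a - i)).sum

/-- weight A assigns to absolute index `i` -/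
def wN (i : Nat) : Int :=
  if i < 12 then 5 else if i < 16 then 4 else if i < 18 then 3 else if i = 18 then 2 else 1

/-- the weighted tail sum A computes, starting at absolute index `i` -/
def fSum (xs : List Int) (i : Nat) : Int :=
  5 * bandSum xs i 0 12 + 4 * bandSum xs i 12 16 + 3 * bandSum xs i 16 18
    + 2 * bandSum xs i 18 19 + (xs.drop (19 - i)).sum

theorem bandSum_cons (c : Int) (xs : List Int) (i a b : Nat) :
    bandSum (c :: xs) i a b = (if a ≤ i ∧ i < b then c else 0) + bandSum xs (i + 1) a b := by
  unfold bandSum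
  rcases Nat.lt_or_ge i b with hb | hb
  · have h1 : b - i = (b - (i + 1)) + 1 := by omega
    rw [h1, List.take_succ_cons]
    rcases Nat.le_total a i with ha | ha
    · have h2 : a - i = 0 := by omega
      have h3 : a - (i + 1) = 0 := by omega
      simp [h2, h3, ha, hb]
    · rcases Nat.eq_or_lt_of_le ha with he | ha
      · have h3 : a - (i + 1) = 0 := by omega
        simp [hb, ← he]
      · have h2 : a - i = (a - (i + 1)) + 1 := by omega
        rw [h2, List.drop_succ_cons]
        simp [show ¬ (a ≤ i ∧ i < b) by omega]
  · have h1 : b - i = 0 := by omega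
    have h2 : b - (i + 1) = 0 := by omega
    simp [h1, h2, show ¬ (a ≤ i ∧ i < b) by omega]

theorem fSum_cons (c : Int) (xs : List Int) (i : Nat) :
    fSum (c :: xs) i = wN i * c + fSum xs (i + 1) := by
  unfold fSum wN
  rw [bandSum_cons, bandSum_cons, bandSum_cons, bandSum_cons]
  rcases Nat.lt_or_ge i 19 with h19 | h19
  · have h1 : 19 - i = (19 - (i + 1)) + 1 := by omega
    rw [h1, List.drop_succ_cons]
    split_ifs <;> omega
  · have h1 : 19 - i = 0 := by omega
    have h2 : 19 - (i + 1) = 0 := by omega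
    rw [h1, h2]
    simp only [List.drop_zero, List.sum_cons]
    split_ifs <;> omega

theorem pyGetD_append_len (ys : List Int) (c : Int) (xs : List Int) :
    PySem.List.pyGetD (ys ++ c :: xs) (ys.length : Int) 0 = c := by
  rw [PySem.List.pyGetD_natCast]
  simp [List.getD]

theorem loop_eq (xs : List Int) : ∀ (ys rest : List Int) (sq : Int), ys ++ xs = rest →
    (PySem.List.pyRange (ys.length : Int) (rest.length : Int) 1).foldl
      (fun sq i =>
        if i < 12 then sq + 5 * PySem.List.pyGetD rest i 0
        else if i < 16 then sq + 4 * PySem.List.pyGetD rest i 0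
        else if i < 18 then sq + 3 * PySem.List.pyGetD rest i 0
        else if i == 18 then sq + 2 * PySem.List.pyGetD rest i 0
        else sq + PySem.List.pyGetD rest i 0) sq
      = sq + fSum xs ys.length := by
  induction xs with
  | nil =>
    intro ys rest sq h
    rw [PySem.List.pyRange_one_eq_nil (by simp [← h])]
    simp [fSum, bandSum]
  | cons c xs ih =>
    intro ys rest sq h
    have hlen2 : rest.length = ys.length + xs.length + 1 := by rw [← h]; simp; omega
    have hlt : (ys.length : Int) < (rest.length : Int) := by rw [hlen2]; push_cast; omega
    rw [PySem.List.pyRange_one_cons hlt, List.foldl_cons]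
    have hget : PySem.List.pyGetD rest (ys.length : Int) 0 = c := by
      rw [← h]; exact pyGetD_append_len ys c xs
    have hw : (if (ys.length : Int) < 12 then sq + 5 * c
        else if (ys.length : Int) < 16 then sq + 4 * c
        else if (ys.length : Int) < 18 then sq + 3 * c
        else if ((ys.length : Int) == 18) = true then sq + 2 * c
        else sq + c) = sq + wN ys.length * c := by
      unfold wN
      simp only [beq_iff_eq]
      split_ifs <;> first | (exfalso; omega) | ring
    rw [fSum_cons, hget, hw]
    have hstep := ih (ys ++ [c]) rest (sq + wN ys.length * c) (by simp [← h])
    have hlen : ((ys ++ [c]).length : Int) = (ys.length : Int) + 1 := by simp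
    rw [hlen] at hstep
    simp only [List.length_append, List.length_cons, List.length_nil] at hstep
    norm_num at hstep ⊢
    rw [hstep]
    ring

theorem pCounter_eq_fSum (counts : List Int) : pCounter counts = fSum counts 0 := by
  have := loop_eq counts [] counts 0 rfl
  simpa [pCounter] using this

theorem sum_take_drop (l : List Int) (n : Nat) :
    l.sum = (l.take n).sum + (l.drop n).sum := by
  rw [← List.sum_append, List.take_append_drop]

theorem sum_take_split (l : List Int) (m n : Nat) (h : m ≤ n) :
    (l.take n).sum = (l.take m).sum + ((l.take n).drop m).sum := by
  have := sum_take_drop (l.take n) m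
  rw [List.take_take, Nat.min_eq_left h] at this
  omega

theorem alt_eq_fSum (counts : List Int) : pCounter_alt counts = fSum counts 0 := by
  unfold pCounter_alt fSum bandSum
  have s12 : PySem.List.slice counts none (some 12) = counts.take 12 := by
    simpa using PySem.List.slice_to_natCast counts 12
  have s16 : PySem.List.slice counts none (some 16) = counts.take 16 := by
    simpa using PySem.List.slice_to_natCast counts 16
  have s18 : PySem.List.slice counts none (some 18) = counts.take 18 := by
    simpa using PySem.List.slice_to_natCast counts 18
  have s19 : PySem.List.slice counts none (some 19) = counts.take 19 := by
    simpa using PySem.List.slice_to_natCast counts 19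
  rw [s12, s16, s18, s19]
  have h16 := sum_take_split counts 12 16 (by omega)
  have h18 := sum_take_split counts 16 18 (by omega)
  have h19 := sum_take_split counts 18 19 (by omega)
  have htot := sum_take_drop counts 19
  have h12' : ((counts.take 16).drop 12).sum = (counts.take 16).sum - (counts.take 12).sum := by omega
  norm_num
  omega

-- ===== VERDICT (by name: the statement is the Claim_ definition above) =====
theorem pCounter_spec : Claim_equal_pCounter := by
  intro counts _
  unfold Spec_pCounter
  rw [pCounter_eq_fSum, alt_eq_fSum]
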